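-- pv_equiv track=rewrite | github.com/Mr-QB/IoTChallend | test.py | sort_list_by_elements
-- ===== SOURCE A (Python) =====
-- def sort_list_by_elements(elements, lst=[0, 1, 2, 3, 4, 5], limit=2):
--     count_dict = {}  # Từ điển lưu số lần xuất hiện của mỗi phần tử
--     for item in elements:
--         count_dict[item] = count_dict.get(item, 0) + 1  # Đếm số lần xuất hiện
--
--     elements = [
--         item for item in elements if count_dict.get(item, 0) <= limit
--     ]  # Lọc các phần tử theo số lần xuất hiện
--     lst = [
--         item for item in lst if count_dict.get(item, 0) <= limit
--     ]  # Lọc danh sách theo số lần xuất hiện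
--     elements = list(set(elements))  # Loại bỏ các phần tử trùng lặp
--     sorted_list = sorted(
--         lst, key=lambda x: x in elements, reverse=True
--     )  # Sắp xếp danh sách dựa trên sự hiện diện trong elements
--     return sorted_list
-- ===== SOURCE B (Python) =====
-- def sort_list_by_elements(elements, lst=[0, 1, 2, 3, 4, 5], limit=2):
--     counts = {}
--     for item in elements:
--         counts[item] = counts.get(item, 0) + 1
--     keep = {item for item in elements if counts.get(item, 0) <= limit}
--     filtered = [x for x in lst if counts.get(x, 0) <= limit]
--     return [x for x in filtered if x in keep] + [x for x in filtered if x not in keep]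
-- ===== Notes on version B (the rewrite author's own statement) =====
-- stated objective: alternative
-- what changed: Replaces list(set(...)) dedup plus a stable reverse boolean-key sort with a membership set and a two-pass order-preserving partition (members first, then non-members) of the filtered list.
import Mathlib
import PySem

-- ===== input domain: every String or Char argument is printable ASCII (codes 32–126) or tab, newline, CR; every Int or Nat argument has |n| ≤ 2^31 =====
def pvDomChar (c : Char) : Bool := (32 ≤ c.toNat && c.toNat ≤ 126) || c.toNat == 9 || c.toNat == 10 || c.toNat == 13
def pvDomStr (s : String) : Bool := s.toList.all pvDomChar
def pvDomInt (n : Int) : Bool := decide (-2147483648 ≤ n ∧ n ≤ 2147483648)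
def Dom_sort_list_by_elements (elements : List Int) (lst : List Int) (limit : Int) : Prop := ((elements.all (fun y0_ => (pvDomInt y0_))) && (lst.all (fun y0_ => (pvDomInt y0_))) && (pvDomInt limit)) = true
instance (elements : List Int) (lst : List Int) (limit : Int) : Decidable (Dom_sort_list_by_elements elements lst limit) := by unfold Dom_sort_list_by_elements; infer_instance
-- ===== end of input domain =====

-- B replaces A's dedup + stable reverse boolean-key sort by a membership set and a two-pass
-- order-preserving partition of the filtered list (alternative linear strategy, same result).


-- ===== PORT A =====
def sort_list_by_elements (elements : List Int) (lst : List Int) (limit : Int) : List Int :=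
  let count_dict : PySem.Dict Int Int :=
    elements.foldl (fun d item => d.insert item (d.getD item 0 + 1)) PySem.Dict.empty
  let elements' := elements.filter (fun item => decide (count_dict.getD item 0 ≤ limit))
  let lst' := lst.filter (fun item => decide (count_dict.getD item 0 ≤ limit))
  let elements'' : PySem.Set Int := PySem.Set.ofList elements'
  PySem.List.sorted lst' (fun x => decide (x ∈ elements'')) true

-- ===== PORT B =====
def sort_list_by_elements_alt (elements : List Int) (lst : List Int) (limit : Int) : List Int :=
  let counts : PySem.Dict Int Int :=
    elements.foldl (fun d item => d.insert item (d.getD item 0 + 1)) PySem.Dict.empty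
  let keep : PySem.Set Int :=
    PySem.Set.ofList (elements.filter (fun item => decide (counts.getD item 0 ≤ limit)))
  let filtered := lst.filter (fun x => decide (counts.getD x 0 ≤ limit))
  filtered.filter (fun x => PySem.Set.contains keep x)
    ++ filtered.filter (fun x => !(PySem.Set.contains keep x))

-- ===== PRECONDITION & SPEC =====
def Spec_sort_list_by_elements (elements : List Int) (lst : List Int) (limit : Int) (out : List Int) : Prop := out = sort_list_by_elements_alt elements lst limit
instance (elements : List Int) (lst : List Int) (limit : Int) (out : List Int) : Decidable (Spec_sort_list_by_elements elements lst limit out) := by unfold Spec_sort_list_by_elements; infer_instance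

-- ===== CLAIM (what is proved, stated in full; the proofs are below) =====
def Claim_equal_sort_list_by_elements : Prop := ∀ (elements : List Int) (lst : List Int) (limit : Int), Dom_sort_list_by_elements elements lst limit → Spec_sort_list_by_elements elements lst limit (sort_list_by_elements elements lst limit)

-- ===== LEMMAS AND PROOFS =====

-- stable insertion of x into "trues ++ falses" when x is inserted before z (a false element)
theorem insertBy_all_false_cons {α : Type} (before : α → α → Bool) (x z : α) (P N : List α)
    (hP : ∀ y ∈ P, before x y = false) (hz : before x z = true) :
    PySem.List.insertBy before x (P ++ z :: N) = P ++ x :: z :: N := by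
  induction P with
  | nil => simp [PySem.List.insertBy, hz]
  | cons a P ih =>
    have ha : before x a = false := hP a (by simp)
    simp only [List.cons_append, PySem.List.insertBy, ha]
    simp only [Bool.false_eq_true, if_false, List.cons.injEq, true_and]
    exact ih (fun y hy => hP y (by simp [hy]))

-- the foldl insertion-sort loop with a boolean key, reverse=True, is a stable partition
theorem foldl_insertBy_bool {α : Type} (p : α → Bool) (xs P N : List α)
    (hP : ∀ y ∈ P, p y = true) (hN : ∀ y ∈ N, p y = false) :
    xs.foldl (fun acc x => PySem.List.insertBy (fun a b => decide ((p b) < (p a))) x acc) (P ++ N)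
      = (P ++ xs.filter p) ++ (N ++ xs.filter (fun x => !p x)) := by
  induction xs generalizing P N with
  | nil => simp
  | cons x xs ih =>
    simp only [List.foldl_cons]
    by_cases hx : p x = true
    · have hstep : PySem.List.insertBy (fun a b => decide ((p b) < (p a))) x (P ++ N)
          = (P ++ [x]) ++ N := by
        cases N with
        | nil =>
          simp only [List.append_nil]
          apply PySem.List.insertBy_of_forall_not_before
          intro y hy; simp [hP y hy, hx]
        | cons z N' =>
          rw [insertBy_all_false_cons]
          · simp
          · intro y hy; simp [hP y hy, hx]
          · simp [hN z (by simp), hx, Bool.lt_iff]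
      have hP' : ∀ y ∈ P ++ [x], p y = true := by
        intro y hy
        rcases List.mem_append.1 hy with h | h
        · exact hP y h
        · simp at h; simpa [h] using hx
      rw [hstep, ih (P ++ [x]) N hP' hN]
      simp [hx]
    · have hx' : p x = false := by simpa using hx
      have hstep : PySem.List.insertBy (fun a b => decide ((p b) < (p a))) x (P ++ N)
          = P ++ (N ++ [x]) := by
        rw [← List.append_assoc]
        apply PySem.List.insertBy_of_forall_not_before
        intro y hy; simp [hx', Bool.lt_iff]
      have hN' : ∀ y ∈ N ++ [x], p y = false := by
        intro y hy
        rcases List.mem_append.1 hy with h | h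
        · exact hN y h
        · simp at h; simpa [h] using hx'
      rw [hstep, ih P (N ++ [x]) hP hN']
      simp [hx']

-- the stable reverse sort by a boolean key IS the stable partition
theorem sorted_bool_rev {α : Type} (p : α → Bool) (xs : List α) :
    PySem.List.sorted xs (fun x => p x) true
      = xs.filter p ++ xs.filter (fun x => !p x) := by
  rw [PySem.List.sorted_rev_eq_foldl_insertBy]
  simpa using foldl_insertBy_bool p xs [] [] (by simp) (by simp)

-- ===== VERDICT (by name: the statement is the Claim_ definition above) =====
theorem sort_list_by_elements_spec : Claim_equal_sort_list_by_elements := by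
  intro elements lst limit _
  show sort_list_by_elements elements lst limit = sort_list_by_elements_alt elements lst limit
  unfold sort_list_by_elements sort_list_by_elements_alt
  rw [sorted_bool_rev]
  congr 1 <;>
  · apply List.filter_congr
    intro x hx
    simp [PySem.Set.contains]
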